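-- pv_equiv track=rewrite | github.com/hun186/menu-planner | src/menu_planner/engine/planner.py | _max_active_days_in_window
-- ===== SOURCE A (Python) =====
-- from typing import Any, Dict, List, Tuple
--
-- def _max_active_days_in_window(active_mask: List[bool], window_days: int = 30) -> int:
--     if not active_mask:
--         return 0
--
--     w = max(1, int(window_days))
--     best = 0
--     cur = 0
--     left = 0
--
--     for right, is_active in enumerate(active_mask):
--         cur += 1 if is_active else 0
--         while right - left + 1 > w:
--             cur -= 1 if active_mask[left] else 0
--             left += 1
--         if cur > best:
--             best = cur
--     return best
-- ===== SOURCE B (Python) =====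
-- def _max_active_days_in_window(active_mask, window_days=30):
--     if not active_mask:
--         return 0
--
--     w = max(1, int(window_days))
--     n = len(active_mask)
--
--     # prefix sums: P[i] = number of active days among the first i entries
--     P = [0] * (n + 1)
--     for i, a in enumerate(active_mask):
--         P[i + 1] = P[i] + (1 if a else 0)
--
--     best = 0
--     for right in range(n):
--         left = max(0, right - w + 1)
--         c = P[right + 1] - P[left]
--         if c > best:
--             best = c
--     return best
-- ===== Notes on version B (the rewrite author's own statement) =====
-- stated objective: alternative
-- what changed: Replaced A's two-pointer sliding window with mutable (best, cur, left) state and an inner shrink loop by a prefix-sum table built once and a single pass that computes each window count as a difference of two prefix sums.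
import Mathlib
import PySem

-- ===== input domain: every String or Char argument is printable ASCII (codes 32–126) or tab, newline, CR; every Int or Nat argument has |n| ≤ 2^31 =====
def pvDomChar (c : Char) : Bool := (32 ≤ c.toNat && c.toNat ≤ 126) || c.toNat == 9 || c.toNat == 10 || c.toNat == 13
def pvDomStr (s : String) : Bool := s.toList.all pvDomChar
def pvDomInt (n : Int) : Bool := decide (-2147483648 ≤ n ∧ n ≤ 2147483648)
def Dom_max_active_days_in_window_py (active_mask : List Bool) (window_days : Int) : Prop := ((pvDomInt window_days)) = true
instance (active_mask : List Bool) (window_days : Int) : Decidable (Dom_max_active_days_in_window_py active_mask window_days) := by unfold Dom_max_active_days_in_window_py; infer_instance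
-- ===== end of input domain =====

-- B replaces A's sliding-window two-pointer loop by a prefix-sum table queried once per
-- window (objective: alternative decomposition, same O(n) cost).

-- ===== PORT A =====
-- the 'while right - left + 1 > w' loop; active_mask[left] is always in range in A's
-- executions, so pyGetD with an unused default is exact here
def pvShrink (xs : List Bool) (w : Int) (right : Int) (cur left : Int) : Int × Int :=
  if right - left + 1 > w then
    pvShrink xs w right (cur - (if PySem.List.pyGetD xs left false then 1 else 0)) (left + 1)
  else (cur, left)
termination_by (right - left + 1 - w).toNat
decreasing_by omega

-- the 'for right, is_active in enumerate(active_mask)' loop, state (best, cur, left)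
def pvLoopA (xs : List Bool) (w : Int) : List Bool → Int → Int → Int → Int → Int
  | [], _, best, _, _ => best
  | a :: rest, right, best, cur, left =>
    let cur := cur + (if a then 1 else 0)
    let p := pvShrink xs w right cur left
    pvLoopA xs w rest (right + 1) (if p.1 > best then p.1 else best) p.1 p.2

def max_active_days_in_window_py (active_mask : List Bool) (window_days : Int) : Int :=
  if active_mask = [] then 0
  else pvLoopA active_mask (max 1 window_days) active_mask 0 0 0 0

-- ===== PORT B =====
-- the prefix-sum table: pvPrefix xs acc = [acc, acc+bit xs[0], acc+bit xs[0]+bit xs[1], …]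
def pvPrefix (xs : List Bool) (acc : Int) : List Int :=
  match xs with
  | [] => [acc]
  | a :: t => acc :: pvPrefix t (acc + (if a then 1 else 0))

def max_active_days_in_window_py_alt (active_mask : List Bool) (window_days : Int) : Int :=
  if active_mask = [] then 0
  else
    let w := max 1 window_days
    let n : Int := active_mask.length
    let P := pvPrefix active_mask 0
    (PySem.List.pyRange 0 n 1).foldl
      (fun best right =>
        let left := max 0 (right - w + 1)
        let c := PySem.List.pyGetD P (right + 1) 0 - PySem.List.pyGetD P left 0
        if c > best then c else best) 0

-- ===== PRECONDITION & SPEC =====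
def Spec_max_active_days_in_window_py (active_mask : List Bool) (window_days : Int) (out : Int) : Prop := out = max_active_days_in_window_py_alt active_mask window_days
instance (active_mask : List Bool) (window_days : Int) (out : Int) : Decidable (Spec_max_active_days_in_window_py active_mask window_days out) := by unfold Spec_max_active_days_in_window_py; infer_instance

-- ===== CLAIM (what is proved, stated in full; the proofs are below) =====
def Claim_equal_max_active_days_in_window_py : Prop := ∀ (active_mask : List Bool) (window_days : Int), Dom_max_active_days_in_window_py active_mask window_days → Spec_max_active_days_in_window_py active_mask window_days (max_active_days_in_window_py active_mask window_days)

-- ===== LEMMAS AND PROOFS =====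

-- number of active entries among the first i
def pvCnt (xs : List Bool) (i : Nat) : Int := ((xs.take i).count true : Int)

-- count of window ending at index r, window width W
def pvWin (xs : List Bool) (W r : Nat) : Int := pvCnt xs (r + 1) - pvCnt xs (r + 1 - W)

def pvStep (xs : List Bool) (W : Nat) (b : Int) (r : Nat) : Int :=
  if pvWin xs W r > b then pvWin xs W r else b

lemma pvCnt_succ (xs : List Bool) (i : Nat) (h : i < xs.length) :
    pvCnt xs (i + 1) = pvCnt xs i + (if xs[i] then 1 else 0) := by
  unfold pvCnt
  rw [List.take_add_one, List.getElem?_eq_getElem h]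
  by_cases hx : xs[i] <;> simp [List.count_append, hx]

lemma pvShrink_char (xs : List Bool) (w : Int) (W k : Nat) (c : Int)
    (hw : (W : Int) = w) (hW : 1 ≤ W) (hk : k < xs.length) :
    pvShrink xs w (k : Int) c ((k - W : Nat) : Int)
      = ((if W ≤ k then c - (if xs[k - W] then 1 else 0) else c), ((k + 1 - W : Nat) : Int)) := by
  rw [pvShrink]
  by_cases hWk : W ≤ k
  · have h1 : ((k : Int) - ((k - W : Nat) : Int) + 1 > w) := by omega
    rw [if_pos h1]
    have hlt : k - W < xs.length := by omega
    have hget : PySem.List.pyGetD xs ((k - W : Nat) : Int) false = xs[k - W] := by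
      simp [PySem.List.pyGetD_natCast, List.getD_eq_getElem?_getD, List.getElem?_eq_getElem hlt]
    rw [hget, pvShrink]
    have h2 : ¬ ((k : Int) - (((k - W : Nat) : Int) + 1) + 1 > w) := by omega
    rw [if_neg h2]
    simp only [if_pos hWk]
    rw [show ((k + 1 - W : Nat) : Int) = ((k - W : Nat) : Int) + 1 by omega]
  · have h1 : ¬ ((k : Int) - ((k - W : Nat) : Int) + 1 > w) := by omega
    rw [if_neg h1]
    simp only [if_neg hWk]
    rw [show ((k + 1 - W : Nat) : Int) = ((k - W : Nat) : Int) by omega]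

lemma pvLoopA_char (xs : List Bool) (w : Int) (W : Nat)
    (hw : (W : Int) = w) (hW : 1 ≤ W) :
    ∀ m k b, k + m = xs.length →
      pvLoopA xs w (xs.drop k) (k : Int) b (pvCnt xs k - pvCnt xs (k - W)) ((k - W : Nat) : Int)
        = (List.range' k m).foldl (pvStep xs W) b := by
  intro m
  induction m with
  | zero =>
    intro k b hk
    have : xs.drop k = [] := by
      apply List.drop_eq_nil_of_le; omega
    simp [this, pvLoopA, List.range']
  | succ m ih =>
    intro k b hk
    have hklt : k < xs.length := by omega
    have hdrop : xs.drop k = xs[k] :: xs.drop (k + 1) := List.drop_eq_getElem_cons hklt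
    rw [hdrop]
    simp only [pvLoopA]
    rw [pvShrink_char xs w W k _ hw hW hklt]
    have hcur : (if W ≤ k then
          (pvCnt xs k - pvCnt xs (k - W) + (if xs[k] then 1 else 0)) - (if xs[k - W] then 1 else 0)
        else pvCnt xs k - pvCnt xs (k - W) + (if xs[k] then 1 else 0))
        = pvCnt xs (k + 1) - pvCnt xs (k + 1 - W) := by
      rw [pvCnt_succ xs k hklt]
      by_cases hWk : W ≤ k
      · rw [if_pos hWk]
        have : k + 1 - W = (k - W) + 1 := by omega
        rw [this, pvCnt_succ xs (k - W) (by omega)]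
        ring
      · rw [if_neg hWk]
        have h0 : k - W = 0 := by omega
        have h1 : k + 1 - W = 0 := by omega
        rw [h0, h1]
        ring
    simp only [hcur]
    have hcast : ((k : Int) + 1) = ((k + 1 : Nat) : Int) := by push_cast; ring
    rw [hcast, ih (k + 1) _ (by omega)]
    have : (List.range' k (m + 1)) = k :: List.range' (k + 1) m := rfl
    rw [this, List.foldl_cons]
    simp [pvStep, pvWin]

lemma pvPrefix_getD (xs : List Bool) (acc : Int) :
    ∀ i, i ≤ xs.length → (pvPrefix xs acc).getD i 0 = acc + pvCnt xs i := by
  induction xs generalizing acc with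
  | nil =>
    intro i hi
    have : i = 0 := by simpa using hi
    subst this
    simp [pvPrefix, pvCnt]
  | cons a t ih =>
    intro i hi
    cases i with
    | zero => simp [pvPrefix, pvCnt]
    | succ j =>
      simp only [pvPrefix, List.getD_cons_succ]
      rw [ih _ j (by simpa using hi)]
      simp [pvCnt, List.take_succ_cons, List.count_cons]
      by_cases h : a <;> simp [h] <;> ring

lemma pvA_char (xs : List Bool) (wd : Int) (hne : xs ≠ []) :
    max_active_days_in_window_py xs wd
      = (List.range xs.length).foldl (pvStep xs (max 1 wd).toNat) 0 := by
  have hw : (((max 1 wd).toNat : Nat) : Int) = max 1 wd := by omega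
  have hW : 1 ≤ (max 1 wd).toNat := by omega
  unfold max_active_days_in_window_py
  rw [if_neg hne, List.range_eq_range']
  have h := pvLoopA_char xs (max 1 wd) (max 1 wd).toNat hw hW xs.length 0 0 (by omega)
  simpa [pvCnt] using h

lemma pvB_char (xs : List Bool) (wd : Int) (hne : xs ≠ []) :
    max_active_days_in_window_py_alt xs wd
      = (List.range xs.length).foldl (pvStep xs (max 1 wd).toNat) 0 := by
  have hw : (((max 1 wd).toNat : Nat) : Int) = max 1 wd := by omega
  have hW : 1 ≤ (max 1 wd).toNat := by omega
  unfold max_active_days_in_window_py_alt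
  rw [if_neg hne]
  dsimp only
  rw [PySem.List.pyRange_one]
  simp only [Int.sub_zero, Int.toNat_natCast, List.foldl_map, zero_add]
  apply List.foldl_ext
  intro b r hr
  have hrlt : r < xs.length := List.mem_range.mp hr
  have e1 : PySem.List.pyGetD (pvPrefix xs 0) ((r : Int) + 1) 0 = pvCnt xs (r + 1) := by
    rw [show ((r : Int) + 1) = ((r + 1 : Nat) : Int) by push_cast; ring,
      PySem.List.pyGetD_natCast, pvPrefix_getD xs 0 (r + 1) (by omega)]
    ring
  have e2 : max 0 ((r : Int) - max 1 wd + 1) = ((r + 1 - (max 1 wd).toNat : Nat) : Int) := by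
    omega
  have e3 : PySem.List.pyGetD (pvPrefix xs 0) ((r + 1 - (max 1 wd).toNat : Nat) : Int) 0
      = pvCnt xs (r + 1 - (max 1 wd).toNat) := by
    rw [PySem.List.pyGetD_natCast, pvPrefix_getD xs 0 _ (by omega)]
    ring
  simp only [e1, e2, e3, pvStep, pvWin]

-- ===== VERDICT (by name: the statement is the Claim_ definition above) =====
theorem max_active_days_in_window_py_spec : Claim_equal_max_active_days_in_window_py := by
  intro xs wd _
  unfold Spec_max_active_days_in_window_py
  by_cases hne : xs = []
  · subst hne
    rfl
  · rw [pvA_char xs wd hne, pvB_char xs wd hne]
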